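-- pv_equiv track=rewrite | github.com/AlSakharoB/middle1 | ft_second_simple_max_num.py | ft_second_simple_max_num
-- ===== SOURCE A (Python) =====
-- def ft_second_simple_max_num(number):
--     if number < 0:
--         number = -number
--     max1 = 0
--     max2 = 0
--     x = 0
--     while number > 0:
--         x = number % 10
--         if x > max1:
--             max2 = max1
--             max1 = x
--         elif x > max2:
--             max2 = x
--         number //= 10
--     if max1 == max2:
--         return -1
--     return max2
-- ===== SOURCE B (Python) =====
-- def ft_second_simple_max_num(number):
--     n = abs(number)
--     digits = []
--     while n > 0:
--         digits.append(n % 10)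
--         n //= 10
--     digits += [0, 0]
--     digits.sort(reverse=True)
--     return -1 if digits[0] == digits[1] else digits[1]
-- ===== Notes on version B (the rewrite author's own statement) =====
-- stated objective: alternative
-- what changed: Replaces the single-pass top-two tracking loop with building the digit list, padding two zeros (the loop's max1/max2 zero initialisation), sorting descending, and reading the two largest entries.
import Mathlib
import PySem

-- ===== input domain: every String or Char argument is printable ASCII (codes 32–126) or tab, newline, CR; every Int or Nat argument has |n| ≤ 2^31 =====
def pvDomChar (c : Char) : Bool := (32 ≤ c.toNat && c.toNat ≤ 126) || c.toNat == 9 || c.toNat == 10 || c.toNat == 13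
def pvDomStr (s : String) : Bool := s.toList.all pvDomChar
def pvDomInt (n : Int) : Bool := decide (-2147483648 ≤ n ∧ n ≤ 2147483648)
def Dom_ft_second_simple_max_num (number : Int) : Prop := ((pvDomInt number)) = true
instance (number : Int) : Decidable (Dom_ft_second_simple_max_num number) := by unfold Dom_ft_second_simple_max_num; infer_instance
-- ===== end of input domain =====

-- B replaces A's single-pass top-two tracking loop by: build the digit list, pad two zeros
-- (the loop's zero initialisation of max1/max2), sort descending, read the two largest entries.
-- Objective: alternative (a genuinely different algorithm of similar size and cost).

-- ===== PORT A =====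
-- the while loop of A: state (number, max1, max2); x is local to each iteration
def pvLoopA (number max1 max2 : Int) : Int × Int :=
  if h : number > 0 then
    let x := PySem.Int.mod number 10
    if x > max1 then pvLoopA (PySem.Int.floordiv number 10) x max1
    else if x > max2 then pvLoopA (PySem.Int.floordiv number 10) max1 x
    else pvLoopA (PySem.Int.floordiv number 10) max1 max2
  else (max1, max2)
termination_by number.toNat
decreasing_by all_goals
  · rw [PySem.Int.floordiv_eq_ediv_of_pos (by omega)]
    omega

def ft_second_simple_max_num (number : Int) : Int :=
  let number := if number < 0 then -number else number
  let r := pvLoopA number 0 0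
  if r.1 = r.2 then -1 else r.2

-- ===== PORT B =====
-- the while loop of B: appends n % 10 to the accumulated digit list
def pvDigitsB (n : Int) (digits : List Int) : List Int :=
  if h : n > 0 then pvDigitsB (PySem.Int.floordiv n 10) (digits ++ [PySem.Int.mod n 10])
  else digits
termination_by n.toNat
decreasing_by
  · rw [PySem.Int.floordiv_eq_ediv_of_pos (by omega)]
    omega

def ft_second_simple_max_num_alt (number : Int) : Int :=
  let n := |number|
  let digits := pvDigitsB n []
  let digits := digits ++ [0, 0]
  let s := PySem.List.sorted digits (fun x => x) true
  if PySem.List.pyGetD s 0 0 = PySem.List.pyGetD s 1 0 then -1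
  else PySem.List.pyGetD s 1 0

-- ===== PRECONDITION & SPEC =====
def Spec_ft_second_simple_max_num (number : Int) (out : Int) : Prop := out = ft_second_simple_max_num_alt number
instance (number : Int) (out : Int) : Decidable (Spec_ft_second_simple_max_num number out) := by unfold Spec_ft_second_simple_max_num; infer_instance

-- ===== CLAIM (what is proved, stated in full; the proofs are below) =====
def Claim_equal_ft_second_simple_max_num : Prop := ∀ (number : Int), Dom_ft_second_simple_max_num number → Spec_ft_second_simple_max_num number (ft_second_simple_max_num number)

-- ===== LEMMAS AND PROOFS =====

-- A's loop body as a step function on the (max1, max2) state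
def pvStep (p : Int × Int) (x : Int) : Int × Int :=
  if x > p.1 then (x, p.1) else if x > p.2 then (p.1, x) else p

lemma pvStep_comm (s : Int × Int) (a b : Int) :
    pvStep (pvStep s a) b = pvStep (pvStep s b) a := by
  obtain ⟨m1, m2⟩ := s
  simp only [pvStep]
  split_ifs <;> simp_all [Prod.ext_iff] <;> omega

lemma pvDigitsB_acc (n : Int) (digits : List Int) :
    ∀ acc, pvDigitsB n acc = acc ++ pvDigitsB n [] := by
  induction n, digits using pvDigitsB.induct with
  | case1 n digits h ih =>
    intro acc
    conv_lhs => rw [pvDigitsB, dif_pos h]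
    conv_rhs => rw [pvDigitsB, dif_pos h]
    rw [ih (acc ++ [PySem.Int.mod n 10]), ih ([] ++ [PySem.Int.mod n 10])]
    simp
  | case2 n digits h =>
    intro acc
    conv_lhs => rw [pvDigitsB, dif_neg h]
    conv_rhs => rw [pvDigitsB, dif_neg h]
    simp

lemma pvDigitsB_pos (n : Int) (h : n > 0) :
    pvDigitsB n [] = PySem.Int.mod n 10 :: pvDigitsB (PySem.Int.floordiv n 10) [] := by
  rw [pvDigitsB, dif_pos h, pvDigitsB_acc _ []]
  simp

lemma pvLoopA_eq_foldl (n a b : Int) :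
    pvLoopA n a b = (pvDigitsB n []).foldl pvStep (a, b) := by
  induction n, a, b using pvLoopA.induct with
  | case1 n m1 m2 h x h1 ih =>
    have h1' : m1 < PySem.Int.mod n 10 := h1
    rw [pvLoopA, dif_pos h, pvDigitsB_pos n h, List.foldl_cons]
    simp only [pvStep, gt_iff_lt]
    rw [if_pos h1', if_pos h1']
    exact ih
  | case2 n m1 m2 h x h1 h2 ih =>
    have h1' : ¬ m1 < PySem.Int.mod n 10 := h1
    have h2' : m2 < PySem.Int.mod n 10 := h2
    rw [pvLoopA, dif_pos h, pvDigitsB_pos n h, List.foldl_cons]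
    simp only [pvStep, gt_iff_lt]
    rw [if_neg h1', if_neg h1', if_pos h2', if_pos h2']
    exact ih
  | case3 n m1 m2 h x h1 h2 ih =>
    have h1' : ¬ m1 < PySem.Int.mod n 10 := h1
    have h2' : ¬ m2 < PySem.Int.mod n 10 := h2
    rw [pvLoopA, dif_pos h, pvDigitsB_pos n h, List.foldl_cons]
    simp only [pvStep, gt_iff_lt]
    rw [if_neg h1', if_neg h1', if_neg h2', if_neg h2']
    exact ih
  | case4 n m1 m2 h =>
    rw [pvLoopA, dif_neg h, pvDigitsB, dif_neg h]
    rfl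

lemma pvDigits_nonneg_aux (n : Int) (digits : List Int) :
    (∀ y ∈ digits, 0 ≤ y) → ∀ x ∈ pvDigitsB n digits, 0 ≤ x := by
  induction n, digits using pvDigitsB.induct with
  | case1 n digits h ih =>
    intro hd x hx
    rw [pvDigitsB, dif_pos h] at hx
    refine ih ?_ x hx
    intro y hy
    rcases List.mem_append.1 hy with hy | hy
    · exact hd y hy
    · simp only [List.mem_singleton] at hy
      subst hy
      exact PySem.Int.mod_nonneg _ (by omega)
  | case2 n digits h =>
    intro hd x hx
    rw [pvDigitsB, dif_neg h] at hx
    exact hd x hx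

lemma pvDigits_nonneg (n : Int) : ∀ x ∈ pvDigitsB n [], 0 ≤ x :=
  pvDigits_nonneg_aux n [] (by simp)

-- once the state dominates every remaining element, the fold is constant
lemma pvFoldl_const (t : List Int) (a b : Int) (hle : ∀ x ∈ t, x ≤ b) (hab : b ≤ a) :
    t.foldl pvStep (a, b) = (a, b) := by
  induction t with
  | nil => rfl
  | cons x t ih =>
    have hx : x ≤ b := hle x (by simp)
    have : pvStep (a, b) x = (a, b) := by
      simp only [pvStep]; split_ifs <;> simp_all <;> omega
    rw [List.foldl_cons, this, ih (fun y hy => hle y (by simp [hy]))]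

-- folding A's step over a nonincreasing list of nonnegatives picks its first two entries
lemma pvFoldl_sorted (a b : Int) (t : List Int)
    (hp : (a :: b :: t).Pairwise (fun x y => y ≤ x)) (ha : 0 ≤ a) (hb : 0 ≤ b) :
    (a :: b :: t).foldl pvStep (0, 0) = (a, b) := by
  rcases List.pairwise_cons.1 hp with ⟨h1, hp2⟩
  rcases List.pairwise_cons.1 hp2 with ⟨h2, _⟩
  have hba : b ≤ a := h1 b (by simp)
  have s1 : pvStep (0, 0) a = (a, 0) := by
    simp only [pvStep]; split_ifs <;> simp_all <;> omega
  have s2 : pvStep (a, 0) b = (a, b) := by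
    simp only [pvStep]; split_ifs <;> simp_all <;> omega
  rw [List.foldl_cons, s1, List.foldl_cons, s2]
  exact pvFoldl_const t a b h2 hba

-- ===== VERDICT (by name: the statement is the Claim_ definition above) =====
theorem ft_second_simple_max_num_spec : Claim_equal_ft_second_simple_max_num := by
  intro number _
  simp only [Spec_ft_second_simple_max_num, ft_second_simple_max_num,
    ft_second_simple_max_num_alt]
  have habs : (if number < 0 then -number else number) = |number| := by
    rcases abs_sub_abs_le_abs_sub number 0 with _
    split_ifs with h <;> [exact (abs_of_neg h).symm; exact (abs_of_nonneg (by omega)).symm]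
  rw [habs]
  set n := |number| with hn
  set d := pvDigitsB n [] with hd
  set s := PySem.List.sorted (d ++ [0, 0]) (fun x => x) true with hs
  -- length of s is d.length + 2, so s has at least two elements
  have hlen : s.length = d.length + 2 := by
    rw [hs, PySem.List.length_sorted]; simp
  obtain ⟨a, b, t, hst⟩ : ∃ a b t, s = a :: b :: t := by
    match hms : s, hlen with
    | [], hlen => simp at hlen
    | [x], hlen => simp at hlen
    | a :: b :: t, _ => exact ⟨a, b, t, rfl⟩
  have hperm : s.Perm (d ++ [0, 0]) := PySem.List.sorted_perm _ _ _
  have hnonneg : ∀ x ∈ s, 0 ≤ x := by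
    intro x hx
    rcases List.mem_append.1 (hperm.mem_iff.1 hx) with hx | hx
    · exact pvDigits_nonneg n x hx
    · simp at hx; omega
  have hpair : s.Pairwise (fun x y => y ≤ x) := PySem.List.sorted_pairwise_rev _ _
  -- A's fold over d equals the fold over the sorted padded list
  have hfold : d.foldl pvStep (0, 0) = (a, b) := by
    have e1 : d.foldl pvStep (0, 0) = ((0 : Int) :: 0 :: d).foldl pvStep (0, 0) := by
      simp only [List.foldl_cons]
      norm_num [pvStep]
    have hperm' : ((0 : Int) :: 0 :: d).Perm s := by
      exact ((List.perm_append_comm (l₁ := [0, 0]) (l₂ := d)).trans hperm.symm)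
    have e2 : ((0 : Int) :: 0 :: d).foldl pvStep (0, 0) = s.foldl pvStep (0, 0) :=
      hperm'.foldl_eq' (fun x _ y _ z => pvStep_comm z x y) _
    rw [e1, e2, hst]
    exact pvFoldl_sorted a b t (hst ▸ hpair)
      (hnonneg a (by rw [hst]; simp)) (hnonneg b (by rw [hst]; simp))
  have hloop : pvLoopA n 0 0 = (a, b) := by rw [pvLoopA_eq_foldl, ← hd, hfold]
  rw [hloop, hst]
  simp [PySem.List.pyGetD]
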